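-- pv_equiv track=rewrite | github.com/afridshaik6/learninggit | duplicate.py | sort_duplicates
-- ===== SOURCE A (Python) =====
-- def sort_duplicates(input_str):
--     elements_present = set()
--     output_list = []
--     for i in input_str:
--         if i in elements_present:
--             output_list.append(i)
--         else:
--             elements_present.add(i)
--     return ''.join(sorted(output_list))
-- ===== SOURCE B (Python) =====
-- def sort_duplicates(input_str):
--     counts = {}
--     for ch in input_str:
--         counts[ch] = counts.get(ch, 0) + 1
--     dup = []
--     for ch, cnt in counts.items():
--         dup.extend([ch] * (cnt - 1))
--     return ''.join(sorted(dup))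
-- ===== Notes on version B (the rewrite author's own statement) =====
-- stated objective: idiomatic
-- what changed: Replaces the seen-set membership branch with a frequency-count pass followed by a pass emitting count-1 copies of each distinct character.
import Mathlib
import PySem

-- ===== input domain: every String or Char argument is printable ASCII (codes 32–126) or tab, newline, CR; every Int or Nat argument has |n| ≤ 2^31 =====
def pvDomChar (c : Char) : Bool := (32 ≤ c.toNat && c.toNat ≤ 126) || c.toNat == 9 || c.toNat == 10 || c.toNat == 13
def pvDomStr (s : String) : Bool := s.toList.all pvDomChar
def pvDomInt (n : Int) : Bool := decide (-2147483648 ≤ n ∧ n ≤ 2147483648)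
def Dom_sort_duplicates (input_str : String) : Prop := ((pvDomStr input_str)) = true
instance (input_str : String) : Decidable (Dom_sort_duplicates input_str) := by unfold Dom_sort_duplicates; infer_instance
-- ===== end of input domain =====

-- B replaces A's seen-set membership branch by a frequency count followed by emitting count-1
-- copies per distinct character (idiomatic; same asymptotic cost).

-- ===== PORT A =====
-- one loop step of A: seen-set membership decides append-to-output vs add-to-set
def pvDupStep (st : PySem.Set Char × List Char) (i : Char) : PySem.Set Char × List Char :=
  if PySem.Set.contains st.1 i then (st.1, st.2 ++ [i]) else (PySem.Set.add st.1 i, st.2)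

def sort_duplicates (input_str : String) : String :=
  let st := input_str.toList.foldl pvDupStep (PySem.Set.empty, [])
  String.ofList (PySem.List.sorted st.2 (fun x => x) false)

-- ===== PORT B =====
def sort_duplicates_alt (input_str : String) : String :=
  let counts := input_str.toList.foldl (fun d x => PySem.Dict.modify d x (0 : Int) (· + 1)) PySem.Dict.empty
  let dup := counts.items.foldl (fun acc p => acc ++ List.replicate (p.2 - 1).toNat p.1) []
  String.ofList (PySem.List.sorted dup (fun x => x) false)

-- ===== PRECONDITION & SPEC =====
def Spec_sort_duplicates (input_str : String) (out : String) : Prop := out = sort_duplicates_alt input_str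
instance (input_str : String) (out : String) : Decidable (Spec_sort_duplicates input_str out) := by unfold Spec_sort_duplicates; infer_instance

-- ===== CLAIM (what is proved, stated in full; the proofs are below) =====
def Claim_equal_sort_duplicates : Prop := ∀ (input_str : String), Dom_sort_duplicates input_str → Spec_sort_duplicates input_str (sort_duplicates input_str)

-- ===== LEMMAS AND PROOFS =====

-- A's loop: the output list holds each character count-1 times (0 when absent), relative to the running state
lemma pvA_count (l : List Char) (S : PySem.Set Char) (out : List Char) (c : Char) :
    (l.foldl pvDupStep (S, out)).2.count c =
      out.count c + l.count c - (if c ∈ l ∧ c ∉ S then 1 else 0) := by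
  induction l generalizing S out with
  | nil => simp
  | cons a t ih =>
    simp only [List.foldl_cons, pvDupStep]
    by_cases hS : PySem.Set.contains S a
    · rw [if_pos hS]
      have haS : a ∈ S := (PySem.Set.contains_iff S a).mp hS
      by_cases hca : c = a
      · subst hca
        simp [ih, List.count_append, haS]
        omega
      · simp [ih, List.count_append, hca, Ne.symm hca, List.mem_cons]
    · rw [if_neg hS]
      have haS : a ∉ S := fun h => hS ((PySem.Set.contains_iff S a).mpr h)
      by_cases hca : c = a
      · subst hca
        have hm : c ∈ PySem.Set.add S c := by
          rw [PySem.Set.mem_add]; right; rfl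
        simp [ih, haS, List.mem_cons]
      · have hmem : (c ∈ PySem.Set.add S a) ↔ c ∈ S := by
          rw [PySem.Set.mem_add]; simp [hca]
        simp [ih, hca, Ne.symm hca, List.mem_cons, hmem]

-- flatMap of replicates over distinct keys: the count of c is its own replicate length
lemma pvB_count (keys : List Char) (hk : keys.Nodup) (f : Char → Nat) (c : Char) :
    (keys.flatMap (fun k => List.replicate (f k) k)).count c = if c ∈ keys then f c else 0 := by
  induction keys with
  | nil => simp
  | cons a t ih =>
    rcases List.nodup_cons.mp hk with ⟨ha, ht⟩
    simp only [List.flatMap_cons, List.count_append, ih ht, List.count_replicate,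
      List.mem_cons]
    by_cases hca : c = a
    · subst hca
      simp [ha]
    · simp [hca, Ne.symm hca]

-- the two unsorted duplicate lists are permutations of each other
lemma pv_perm (l : List Char) :
    (l.foldl pvDupStep (PySem.Set.empty, [])).2.Perm
      ((PySem.Dict.counter l).items.foldl
        (fun acc p => acc ++ List.replicate (p.2 - 1).toNat p.1) []) := by
  rw [List.perm_iff_count]
  intro c
  rw [pvA_count l PySem.Set.empty [] c]
  rw [PySem.List.foldl_append_eq_flatMap, PySem.Dict.items_counter, List.flatMap_map]
  have hfun : (fun a : Char => List.replicate (((a, (l.count a : Int)).2 - 1).toNat)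
        (a, (l.count a : Int)).1)
      = (fun k : Char => List.replicate (((l.count k : Int) - 1).toNat) k) := rfl
  rw [hfun]
  simp only [List.nil_append]
  rw [pvB_count (PySem.Set.ofList l) (PySem.Set.nodup_ofList l)
      (fun k => ((l.count k : Int) - 1).toNat) c]
  simp only [PySem.Set.mem_ofList]
  by_cases hc : c ∈ l
  · have h1 : 1 ≤ l.count c := List.one_le_count_iff.mpr hc
    simp only [hc, PySem.Set.empty, List.not_mem_nil, not_false_iff, and_true,
      if_true, List.count_nil]
    omega
  · simp [hc, List.count_eq_zero_of_not_mem hc]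

-- ===== VERDICT (by name: the statement is the Claim_ definition above) =====
theorem sort_duplicates_spec : Claim_equal_sort_duplicates := by
  intro s _
  unfold Spec_sort_duplicates sort_duplicates sort_duplicates_alt
  have hc : (s.toList.foldl (fun d x => PySem.Dict.modify d x (0 : Int) (· + 1)) PySem.Dict.empty)
      = PySem.Dict.counter s.toList := (PySem.Dict.counter_eq_foldl s.toList).symm
  simp only [hc]
  congr 1
  exact PySem.List.sorted_eq_sorted_of_perm _ _ (fun x => x) (fun _ _ h => h) (pv_perm s.toList)
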